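-- pv_equiv track=rewrite | github.com/mrkattelA/python-basics | Python/python-basics/practice/own_raise_except.py | bidic
-- ===== SOURCE A (Python) =====
-- def bidic(d):
--     d2 = d.copy()
--     for k,v in d.items():
--         if v in d2.keys():
--             raise KeyError("Cannot create bidirectional dic " +
--                            "with duplicate keys ")
--         d2[v] = k
--     return d2
-- ===== SOURCE B (Python) =====
-- def bidic(d):
--     values = list(d.values())
--     if len(set(values)) != len(values) or not set(values).isdisjoint(d.keys()):
--         raise KeyError("Cannot create bidirectional dic " +
--                        "with duplicate keys ")
--     return {**d, **{v: k for k, v in d.items()}}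
-- ===== Notes on version B (the rewrite author's own statement) =====
-- stated objective: simpler
-- what changed: Replaces A's incremental check-and-insert loop (membership test against the growing dict at every step) with two up-front set checks (duplicate values, values intersecting keys) followed by a single bulk dict merge.
import Mathlib
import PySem

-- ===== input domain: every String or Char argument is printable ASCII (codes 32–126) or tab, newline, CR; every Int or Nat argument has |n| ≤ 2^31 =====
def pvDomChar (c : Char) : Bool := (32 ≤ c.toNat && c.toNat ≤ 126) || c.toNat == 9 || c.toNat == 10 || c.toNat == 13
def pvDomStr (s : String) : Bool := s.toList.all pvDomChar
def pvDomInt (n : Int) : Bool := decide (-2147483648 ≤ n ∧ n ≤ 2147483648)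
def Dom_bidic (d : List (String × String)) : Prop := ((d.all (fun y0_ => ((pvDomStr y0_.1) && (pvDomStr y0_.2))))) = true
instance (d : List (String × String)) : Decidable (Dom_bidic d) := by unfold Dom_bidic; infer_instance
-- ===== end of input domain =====

-- B replaces A's incremental check-and-insert loop by two up-front set checks
-- (duplicate values, values ∩ keys) followed by a bulk dict merge (objective: simpler).
-- Both raise KeyError on a collision; those inputs are outside Pre_bidic.

-- ===== PORT A =====
-- the 'for k,v in d.items()' loop; 'none' = the explicit 'raise KeyError'
def bidicLoop (items : List (String × String)) (d2 : PySem.Dict String String) :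
    Option (PySem.Dict String String) :=
  match items with
  | [] => some d2
  | (k, v) :: rest =>
    if v ∈ d2.keys then none            -- 'if v in d2.keys(): raise KeyError(...)'
    else bidicLoop rest (d2.insert v k) -- 'd2[v] = k'

def bidic (d : List (String × String)) : List (String × String) :=
  match bidicLoop d (PySem.Dict.mk d) with  -- 'd2 = d.copy()'
  | some d2 => d2.items
  | none => []                          -- KeyError: excluded by Pre_bidic

-- ===== PORT B =====
def bidic_alt (d : List (String × String)) : List (String × String) :=
  let values := d.map Prod.snd          -- values = list(d.values())
  if ((PySem.Set.ofList values).length != values.length)   -- len(set(values)) != len(values)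
      || values.any (fun v => (d.map Prod.fst).contains v) -- not set(values).isdisjoint(d.keys())
  then []                               -- raise KeyError: excluded by Pre_bidic
  else ((PySem.Dict.mk d).update (d.map (fun p => (p.2, p.1)))).items
                                        -- {**d, **{v: k for k, v in d.items()}}

-- ===== PRECONDITION & SPEC =====
-- Pre_ excludes (a) assoc lists with duplicate keys, which do not represent a Python
-- dict, and (b) the inputs on which A raises KeyError: a duplicate value or a value
-- that is also a key.
def Pre_bidic (d : List (String × String)) : Prop :=
  (d.map Prod.fst).Nodup ∧ (d.map Prod.snd).Nodup ∧
    ∀ v ∈ d.map Prod.snd, v ∉ d.map Prod.fst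
instance (d : List (String × String)) : Decidable (Pre_bidic d) := by
  unfold Pre_bidic; infer_instance

def pvWitness_bidic : (List (String × String)) := [("a", "b"), ("c", "d")]

def Spec_bidic (d : List (String × String)) (out : List (String × String)) : Prop := out = bidic_alt d
instance (d : List (String × String)) (out : List (String × String)) : Decidable (Spec_bidic d out) := by unfold Spec_bidic; infer_instance

-- ===== CLAIM (what is proved, stated in full; the proofs are below) =====
def Claim_equal_bidic : Prop := ∀ (d : List (String × String)), Dom_bidic d → Pre_bidic d → Spec_bidic d (bidic d)

-- ===== LEMMAS AND PROOFS =====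

-- A's loop never raises when the remaining values are distinct and fresh for d2,
-- and then it is exactly a fold of inserts.
lemma bidicLoop_eq (items : List (String × String)) (d2 : PySem.Dict String String)
    (hv : (items.map Prod.snd).Nodup)
    (hf : ∀ p ∈ items, p.2 ∉ d2.keys) :
    bidicLoop items d2 = some (items.foldl (fun acc p => acc.insert p.2 p.1) d2) := by
  induction items generalizing d2 with
  | nil => rfl
  | cons hd tl ih =>
    obtain ⟨k, v⟩ := hd
    simp only [List.map_cons, List.nodup_cons] at hv
    have hvk : v ∉ d2.keys := hf (k, v) (List.mem_cons_self ..)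
    simp only [bidicLoop, if_neg hvk, List.foldl_cons]
    refine ih _ hv.2 (fun p hp => ?_)
    rw [PySem.Dict.mem_keys_insert]
    push_neg
    refine ⟨fun h => hv.1 ?_, hf p (List.mem_cons_of_mem _ hp)⟩
    exact h ▸ List.mem_map_of_mem hp

-- ===== VERDICT (by name: the statement is the Claim_ definition above) =====
theorem bidic_spec : Claim_equal_bidic := by
  intro d _ hpre
  obtain ⟨hk, hv, hdisj⟩ := hpre
  show bidic d = bidic_alt d
  have hf : ∀ p ∈ d, p.2 ∉ (PySem.Dict.mk d).keys := by
    intro p hp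
    simpa using hdisj p.2 (List.mem_map_of_mem hp)
  unfold bidic
  rw [bidicLoop_eq d (PySem.Dict.mk d) hv hf]
  unfold bidic_alt
  have hset : PySem.Set.ofList (d.map Prod.snd) = d.map Prod.snd :=
    PySem.Set.ofList_eq_self_of_nodup _ hv
  have hany : (d.map Prod.snd).any (fun v => (d.map Prod.fst).contains v) = false := by
    simp only [List.any_eq_false, List.contains_eq_mem]
    intro v hvm
    simpa using hdisj v hvm
  simp only [hset, hany, bne_self_eq_false, Bool.or_false, if_neg,
    Bool.false_eq_true, not_false_eq_true, PySem.Dict.update, List.foldl_map]
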